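-- pv_equiv track=rewrite | github.com/math-bkim/tri_ptns | injection.py | tri_ptns
-- ===== SOURCE A (Python) =====
-- def S3act(ptn):
--
--     orbit = []
--     S3 = [[0,1,2], [0,2,1], [2,1,0], [1,0, 2], [1,2,0], [2,0,1]   ]
--     for sigma in S3:
--         temp = [ptn[sigma[0]], ptn[sigma[1]], ptn[sigma[2]]]
--         if temp not in orbit:
--             orbit.append(temp)
--     return orbit
--
-- def tri_ptns(n):
--
--     S = [2*i-1 for i in range(1, (n+1)//2 +1 ) ]
--     PP = [ [ ] ]
--
--     while S:
--         k = S.pop()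
--         PP2 = PP[:]
--         for ptn in PP2:
--             temp = ptn[:]+[k]
--             temp.sort(reverse=True)
--             if sum(temp) <=n:
--                 PP.append(temp)
--
--     TP =[ [pi1, pi2, pi3] for pi1 in PP for pi2 in PP for pi3 in PP]
--     TP =[ ptn for ptn in TP if sum(sum(pi) for pi in ptn) ==n ]
--
--     TD = []
--     while TP:
--         ptn = TP.pop()
--         orbit = S3act(ptn)
--         if len(orbit)==3:
--             ind =[i for i, pi in enumerate(orbit) if pi[1]==pi[2]]
--             TD.append(orbit[ind[0]])
--         else:
--             TD.append(orbit[0])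
--         for ptn in orbit[1:]:
--             if ptn in TP:
--                 TP.remove(ptn)
--
--
--     return TD
-- ===== SOURCE B (Python) =====
-- def S3act(ptn):
--     orbit = []
--     S3 = [[0,1,2], [0,2,1], [2,1,0], [1,0, 2], [1,2,0], [2,0,1]]
--     for sigma in S3:
--         temp = [ptn[sigma[0]], ptn[sigma[1]], ptn[sigma[2]]]
--         if temp not in orbit:
--             orbit.append(temp)
--     return orbit
--
-- def tri_ptns(n):
--     # partitions into distinct odd parts with sum <= n, in the same order A builds them;
--     # parts are appended in decreasing order, so no re-sorting is needed
--     PP = [[]]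
--     for k in range(2*((n+1)//2) - 1, 0, -2):
--         PP += [p + [k] for p in PP if sum(p) + k <= n]
--
--     # group partitions by their sum so only completing third components are enumerated
--     bysum = {}
--     for p in PP:
--         bysum.setdefault(sum(p), []).append(p)
--
--     TP = [[p1, p2, p3]
--           for p1 in PP
--           for p2 in PP
--           for p3 in bysum.get(n - sum(p1) - sum(p2), [])]
--
--     # one reverse pass with a seen-set instead of repeated list scans/removals
--     TD = []
--     seen = set()
--     for t in reversed(TP):
--         key = tuple(map(tuple, t))
--         if key in seen:
--             continue
--         orbit = S3act(t)
--         for o in orbit: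
--             seen.add(tuple(map(tuple, o)))
--         if len(orbit) == 3:
--             ind = [i for i, pi in enumerate(orbit) if pi[1] == pi[2]]
--             TD.append(orbit[ind[0]])
--         else:
--             TD.append(orbit[0])
--     return TD
-- ===== Notes on version B (the rewrite author's own statement) =====
-- stated objective: faster
-- what changed: B builds the distinct-odd-part partitions by direct descending append (no re-sort), groups them by sum in a dict so only completing third components are enumerated instead of filtering the full cubic product, and replaces the pop/remove de-duplication loop (which rescans TP for every orbit member) by one reverse pass with a seen-set.
import Mathlib
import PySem

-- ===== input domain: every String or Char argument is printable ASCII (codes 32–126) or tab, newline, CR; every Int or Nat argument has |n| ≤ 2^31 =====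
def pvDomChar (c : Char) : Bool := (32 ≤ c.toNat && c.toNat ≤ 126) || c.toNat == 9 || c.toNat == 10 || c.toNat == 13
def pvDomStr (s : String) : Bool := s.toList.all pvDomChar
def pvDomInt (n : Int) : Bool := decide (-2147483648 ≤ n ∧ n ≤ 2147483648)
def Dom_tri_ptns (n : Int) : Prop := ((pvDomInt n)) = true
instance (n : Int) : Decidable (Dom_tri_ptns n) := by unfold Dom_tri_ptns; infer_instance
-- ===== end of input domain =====

-- B replaces A's cubic partition product and quadratic orbit-removal list scans by a
-- sum-indexed dictionary (only completing third components are enumerated) and a single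
-- reverse pass over the triples with a seen-set.

-- ===== PORT A =====
-- module helper S3act, shared by both Pythons (every list indexed here has length 3)
def pvS3 : List (List Int) := [[0,1,2],[0,2,1],[2,1,0],[1,0,2],[1,2,0],[2,0,1]]

-- the body of S3act's for-loop
def S3step (ptn : List (List Int)) (orbit : List (List (List Int))) (sigma : List Int) :
    List (List (List Int)) :=
  let temp := [PySem.List.pyGetD ptn (PySem.List.pyGetD sigma 0 0) [],
               PySem.List.pyGetD ptn (PySem.List.pyGetD sigma 1 0) [],
               PySem.List.pyGetD ptn (PySem.List.pyGetD sigma 2 0) []]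
  if temp ∈ orbit then orbit else orbit ++ [temp]

def S3act (ptn : List (List Int)) : List (List (List Int)) :=
  pvS3.foldl (S3step ptn) []

-- the representative-selection lines, identical in both Pythons' loop bodies
def pickRep (orbit : List (List (List Int))) : List (List Int) :=
  if orbit.length == 3 then
    let ind := ((PySem.List.enumerate orbit).filter
        (fun p => PySem.List.pyGetD p.2 1 [] == PySem.List.pyGetD p.2 2 [])).map (·.1)
    PySem.List.pyGetD orbit (PySem.List.pyGetD ind 0 0) []
  else
    PySem.List.pyGetD orbit 0 []

theorem tdRemoves_length_le (os : List (List (List Int))) (tp : List (List (List Int))) :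
    (os.foldl (fun tp o => if o ∈ tp then (PySem.List.remove? tp o).getD tp else tp) tp).length
      ≤ tp.length := by
  induction os generalizing tp with
  | nil => simp
  | cons o os ih =>
    refine le_trans (ih _) ?_
    show (if o ∈ tp then (PySem.List.remove? tp o).getD tp else tp).length ≤ tp.length
    split_ifs with h
    · unfold PySem.List.remove?
      rcases hi : List.idxOf? o tp with _ | k
      · simp
      · simpa using List.length_eraseIdx_le tp k
    · exact le_rfl

-- A's 'while TP: ptn = TP.pop(); …' loop (pop from the end, remove orbit members)
def tdLoopA (TP TD : List (List (List Int))) : List (List (List Int)) :=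
  if h : TP = [] then TD
  else
    let ptn := TP.getLast h
    let TP1 := TP.dropLast
    let orbit := S3act ptn
    let TD1 := TD ++ [pickRep orbit]
    let TP2 := (orbit.drop 1).foldl
      (fun tp o => if o ∈ tp then (PySem.List.remove? tp o).getD tp else tp) TP1
    tdLoopA TP2 TD1
termination_by TP.length
decreasing_by
  refine lt_of_le_of_lt (tdRemoves_length_le _ _) ?_
  have hlen : TP.length ≠ 0 := fun hh => h (List.eq_nil_of_length_eq_zero hh)
  simp only [List.length_dropLast]
  omega

-- A: 'while S: k = S.pop()' consumes S from its end — ported as a fold over S.reverse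
def tri_ptns (n : Int) : List (List (List Int)) :=
  let S := (PySem.List.pyRange 1 (PySem.Int.floordiv (n+1) 2 + 1) 1).map (fun i => 2*i - 1)
  let PP := S.reverse.foldl (fun PP k =>
    PP.foldl (fun acc ptn =>
      let temp := PySem.List.sorted (ptn ++ [k]) (fun x => x) true
      if temp.sum ≤ n then acc ++ [temp] else acc) PP) [[]]
  let TP := PP.flatMap (fun p1 => PP.flatMap (fun p2 => PP.map (fun p3 => [p1, p2, p3])))
  let TPf := TP.filter (fun t => (t.map List.sum).sum == n)
  tdLoopA TPf []

-- ===== PORT B =====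
-- B's single reverse pass with a seen-set
def tdScan : List (List (List Int)) → PySem.Set (List (List Int)) → List (List (List Int))
  | [], _ => []
  | t :: rest, seen =>
    if t ∈ seen then tdScan rest seen
    else
      let orbit := S3act t
      let seen' := orbit.foldl (fun s o => PySem.Set.add s o) seen
      pickRep orbit :: tdScan rest seen'

def tri_ptns_alt (n : Int) : List (List (List Int)) :=
  let PP := (PySem.List.pyRange (2 * (PySem.Int.floordiv (n+1) 2) - 1) 0 (-2)).foldl
    (fun PP k => PP ++ (PP.filter (fun p => p.sum + k ≤ n)).map (fun p => p ++ [k])) [[]]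
  let bysum := PP.foldl (fun d p => d.modify p.sum [] (fun l => l ++ [p])) PySem.Dict.empty
  let TP := PP.flatMap (fun p1 => PP.flatMap (fun p2 =>
    (bysum.getD (n - p1.sum - p2.sum) []).map (fun p3 => [p1, p2, p3])))
  tdScan TP.reverse PySem.Set.empty

-- ===== PRECONDITION & SPEC =====
def Spec_tri_ptns (n : Int) (out : List (List (List Int))) : Prop := out = tri_ptns_alt n
instance (n : Int) (out : List (List (List Int))) : Decidable (Spec_tri_ptns n out) := by unfold Spec_tri_ptns; infer_instance

-- ===== CLAIM (what is proved, stated in full; the proofs are below) =====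
def Claim_equal_tri_ptns : Prop := ∀ (n : Int), Dom_tri_ptns n → Spec_tri_ptns n (tri_ptns n)

-- ===== LEMMAS AND PROOFS =====

theorem range_odds_reverse (q : Int) :
    ((PySem.List.pyRange 1 (q + 1) 1).map (fun i => 2*i - 1)).reverse
      = PySem.List.pyRange (2*q - 1) 0 (-2) := by
  by_cases hq : 0 < q
  · rw [PySem.List.pyRange_one]
    have hrhs : PySem.List.pyRange (2*q - 1) 0 (-2)
        = (List.range q.toNat).map (fun k : Nat => (2*q - 1) + (-2) * (k : Int)) := by
      unfold PySem.List.pyRange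
      rw [if_neg (by norm_num)]
      rw [if_neg (by norm_num : ¬ ((0 : Int) < -2))]
      rw [if_pos (by omega : (0 : Int) < 2*q - 1)]
      rw [show ((2*q - 1 - 0 + - -2 - 1) / - -2).toNat = q.toNat from by
        simp only [neg_neg]; omega]
    rw [hrhs]
    apply List.ext_getElem
    · simp
    · intro i h1 h2
      simp only [List.getElem_reverse, List.getElem_map, List.getElem_range,
        List.length_reverse, List.length_map, List.length_range] at h1 h2 ⊢
      omega
  · have h1 : PySem.List.pyRange 1 (q + 1) 1 = [] := PySem.List.pyRange_one_eq_nil (by omega)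
    have h2 : PySem.List.pyRange (2*q - 1) 0 (-2) = [] := by
      unfold PySem.List.pyRange
      rw [if_neg (by norm_num)]
      rw [if_neg (by norm_num : ¬ ((0 : Int) < -2))]
      rw [if_neg (by omega : ¬ ((0:Int) < 2*q - 1))]
      simp
    rw [h1, h2]
    rfl

theorem pairwise_gt_oddRange (q : Int) :
    (PySem.List.pyRange (2*q - 1) 0 (-2)).Pairwise (fun a b => b < a) := by
  rw [← range_odds_reverse, List.pairwise_reverse]
  exact List.Pairwise.map _ (fun a b h => by omega)
    (PySem.List.pairwise_lt_pyRange_one 1 (q+1))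

theorem ppFold_eq (n : Int) (ks : List Int) (PP : List (List Int))
    (hks : ks.Pairwise (fun a b => b < a))
    (hinv : ∀ p ∈ PP, p.Pairwise (fun a b => b < a) ∧ ∀ x ∈ p, ∀ k ∈ ks, k < x)
    (hnd : PP.Nodup) :
    (ks.foldl (fun PP k =>
        PP.foldl (fun acc ptn =>
          if (PySem.List.sorted (ptn ++ [k]) (fun x => x) true).sum ≤ n
          then acc ++ [PySem.List.sorted (ptn ++ [k]) (fun x => x) true] else acc) PP) PP
      = ks.foldl (fun PP k =>
          PP ++ (PP.filter (fun p => p.sum + k ≤ n)).map (fun p => p ++ [k])) PP)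
    ∧ (ks.foldl (fun PP k =>
          PP ++ (PP.filter (fun p => p.sum + k ≤ n)).map (fun p => p ++ [k])) PP).Nodup := by
  induction ks generalizing PP with
  | nil => exact ⟨rfl, hnd⟩
  | cons k ks ih =>
    simp only [List.foldl_cons]
    have hsor : ∀ p ∈ PP, PySem.List.sorted (p ++ [k]) (fun x => x) true = p ++ [k] := by
      intro p hp
      apply PySem.List.sorted_rev_eq_of_perm_of_pairwise_gt _ _ _ (List.Perm.refl _)
      rw [List.pairwise_append]
      refine ⟨(hinv p hp).1, List.pairwise_singleton _ _, ?_⟩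
      intro a ha b hb
      rcases List.mem_singleton.mp hb with rfl
      exact (hinv p hp).2 a ha b (List.mem_cons_self ..)
    have hstep : (PP.foldl (fun acc ptn =>
          if (PySem.List.sorted (ptn ++ [k]) (fun x => x) true).sum ≤ n
          then acc ++ [PySem.List.sorted (ptn ++ [k]) (fun x => x) true] else acc) PP)
        = PP ++ (PP.filter (fun p => p.sum + k ≤ n)).map (fun p => p ++ [k]) := by
      rw [PySem.List.foldl_append_ite
        (p := fun ptn => (PySem.List.sorted (ptn ++ [k]) (fun x => x) true).sum ≤ n)
        (f := fun ptn => PySem.List.sorted (ptn ++ [k]) (fun x => x) true)]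
      have h1 : PP.filter (fun ptn =>
            decide ((PySem.List.sorted (ptn ++ [k]) (fun x => x) true).sum ≤ n))
          = PP.filter (fun p => p.sum + k ≤ n) := by
        apply List.filter_congr
        intro p hp
        rw [hsor p hp, List.sum_append, List.sum_singleton]
      rw [h1]
      congr 1
      apply List.map_congr_left
      intro p hp
      exact hsor p (List.mem_of_mem_filter hp)
    rw [hstep]
    have hkks : ∀ k' ∈ ks, k' < k := (List.pairwise_cons.mp hks).1
    have hinv' : ∀ p ∈ PP ++ (PP.filter (fun p => p.sum + k ≤ n)).map (fun p => p ++ [k]),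
        p.Pairwise (fun a b => b < a) ∧ ∀ x ∈ p, ∀ k' ∈ ks, k' < x := by
      intro p hp
      rcases List.mem_append.mp hp with hp | hp
      · exact ⟨(hinv p hp).1,
          fun x hx k' hk' => (hinv p hp).2 x hx k' (List.mem_cons_of_mem _ hk')⟩
      · obtain ⟨q, hq, rfl⟩ := List.mem_map.mp hp
        have hqPP := List.mem_of_mem_filter hq
        constructor
        · rw [List.pairwise_append]
          refine ⟨(hinv q hqPP).1, List.pairwise_singleton _ _, ?_⟩
          intro a ha b hb
          rcases List.mem_singleton.mp hb with rfl
          exact (hinv q hqPP).2 a ha b (List.mem_cons_self ..)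
        · intro x hx k' hk'
          rcases List.mem_append.mp hx with hx | hx
          · exact (hinv q hqPP).2 x hx k' (List.mem_cons_of_mem _ hk')
          · rcases List.mem_singleton.mp hx with rfl
            exact hkks k' hk'
    have hnd' : (PP ++ (PP.filter (fun p => p.sum + k ≤ n)).map (fun p => p ++ [k])).Nodup := by
      apply List.Nodup.append hnd
      · exact List.Nodup.map (fun a b hab => List.append_cancel_right hab) (hnd.filter _)
      · intro a haPP hamap
        obtain ⟨q, _, hq2⟩ := List.mem_map.mp hamap
        have hk_in : k ∈ a := by
          rw [← hq2]; exact List.mem_append_right _ (List.mem_singleton_self _)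
        have := (hinv a haPP).2 k hk_in k (List.mem_cons_self ..)
        omega
    exact ih _ (List.Pairwise.of_cons hks) hinv' hnd'

theorem bucket_getD (PP : List (List Int)) (m : Int) :
    (PP.foldl (fun d p => d.modify p.sum [] (fun l => l ++ [p])) PySem.Dict.empty).getD m []
      = PP.filter (fun p => p.sum == m) := by
  have h := PySem.Dict.getD_foldl_modify_append
    (PP.map (fun p => (p.sum, p))) PySem.Dict.empty m
  rw [List.foldl_map] at h
  simpa [List.filter_map, Function.comp_def] using h

theorem tp_eq (n : Int) (PP : List (List Int)) :
    (PP.flatMap (fun p1 => PP.flatMap (fun p2 =>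
        PP.map (fun p3 => [p1, p2, p3])))).filter (fun t => (t.map List.sum).sum == n)
      = PP.flatMap (fun p1 => PP.flatMap (fun p2 =>
          ((PP.foldl (fun d p => d.modify p.sum [] (fun l => l ++ [p]))
              PySem.Dict.empty).getD (n - p1.sum - p2.sum) []).map (fun p3 => [p1, p2, p3]))) := by
  rw [List.filter_flatMap]
  apply List.flatMap_congr
  intro p1 _
  rw [List.filter_flatMap]
  apply List.flatMap_congr
  intro p2 _
  rw [List.filter_map, bucket_getD]
  congr 1
  apply List.filter_congr
  intro p3 _
  show (([p1, p2, p3].map List.sum).sum == n) = (p3.sum == n - p1.sum - p2.sum)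
  simp only [List.map_cons, List.map_nil, List.sum_cons, List.sum_nil]
  rw [Bool.eq_iff_iff]
  simp only [beq_iff_eq]
  omega

theorem tp_nodup (PP : List (List Int)) (h : PP.Nodup) :
    (PP.flatMap (fun p1 => PP.flatMap (fun p2 => PP.map (fun p3 => [p1, p2, p3])))).Nodup := by
  rw [List.nodup_flatMap]
  constructor
  · intro p1 _
    rw [List.nodup_flatMap]
    constructor
    · intro p2 _
      exact h.map (fun a b hab => by simpa using hab)
    · refine List.Pairwise.imp ?_ h
      intro a b hne x hx hx'
      obtain ⟨y, _, hy⟩ := List.mem_map.mp hx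
      obtain ⟨z, _, hz⟩ := List.mem_map.mp hx'
      rw [← hz] at hy
      injection hy with _ hy2
      injection hy2 with h4 _
      exact hne h4
  · refine List.Pairwise.imp ?_ h
    intro a b hne x hx hx'
    obtain ⟨y, _, hy⟩ := List.mem_flatMap.mp hx
    obtain ⟨y', _, hy'⟩ := List.mem_map.mp hy
    obtain ⟨z, _, hz⟩ := List.mem_flatMap.mp hx'
    obtain ⟨z', _, hz'⟩ := List.mem_map.mp hz
    rw [← hz'] at hy'
    injection hy' with h4 _
    exact hne h4

theorem foldl_extends (f : List (List (List Int)) → List Int → List (List (List Int)))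
    (hf : ∀ acc x, f acc x = acc ∨ ∃ t, f acc x = acc ++ [t]) :
    ∀ (l : List (List Int)) (init : List (List (List Int))),
      ∃ tl, l.foldl f init = init ++ tl := by
  intro l
  induction l with
  | nil => exact fun init => ⟨[], by simp⟩
  | cons x xs ih =>
    intro init
    rcases hf init x with hx | ⟨t, ht⟩
    · obtain ⟨tl, htl⟩ := ih (f init x)
      exact ⟨tl, by rw [List.foldl_cons, htl, hx]⟩
    · obtain ⟨tl, htl⟩ := ih (f init x)
      exact ⟨[t] ++ tl, by rw [List.foldl_cons, htl, ht, List.append_assoc]⟩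

theorem S3act_shape (a b c : List Int) : ∃ l, S3act [a, b, c] = [a, b, c] :: l := by
  have hf : ∀ acc sigma, S3step [a,b,c] acc sigma = acc
      ∨ ∃ t, S3step [a,b,c] acc sigma = acc ++ [t] := by
    intro acc sigma
    unfold S3step
    by_cases hm : [PySem.List.pyGetD [a,b,c] (PySem.List.pyGetD sigma 0 0) [],
                   PySem.List.pyGetD [a,b,c] (PySem.List.pyGetD sigma 1 0) [],
                   PySem.List.pyGetD [a,b,c] (PySem.List.pyGetD sigma 2 0) []] ∈ acc
    · left; exact if_pos hm
    · right; exact ⟨_, if_neg hm⟩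
  obtain ⟨tl, htl⟩ := foldl_extends (S3step [a,b,c]) hf
    [[0,2,1],[2,1,0],[1,0,2],[1,2,0],[2,0,1]] [[a,b,c]]
  refine ⟨tl, ?_⟩
  unfold S3act
  have h0 : pvS3 = [0,1,2] :: [[0,2,1],[2,1,0],[1,0,2],[1,2,0],[2,0,1]] := rfl
  rw [h0, List.foldl_cons]
  have h1 : S3step [a,b,c] [] [0,1,2] = [[a,b,c]] := by
    unfold S3step
    rw [if_neg (by simp)]
    rfl
  rw [h1, htl]
  rfl

theorem remove?_nodup_eq (tp : List (List (List Int))) (o : List (List Int))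
    (h : tp.Nodup) (ho : o ∈ tp) :
    PySem.List.remove? tp o = some (tp.filter (fun x => decide (x ≠ o))) := by
  induction tp with
  | nil => cases ho
  | cons x xs ih =>
    unfold PySem.List.remove?
    rw [List.idxOf?_cons]
    by_cases hxo : x = o
    · subst hxo
      rw [if_pos (by simp)]
      have hnx : x ∉ xs := (List.nodup_cons.mp h).1
      have hself : xs.filter (fun y => decide (y ≠ x)) = xs :=
        List.filter_eq_self.mpr (fun y hy => by
          simp only [decide_eq_true_eq]
          exact fun hyx => hnx (hyx ▸ hy))
      show some xs = some (List.filter (fun y => decide (y ≠ x)) (x :: xs))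
      rw [List.filter_cons_of_neg (by simp), hself]
    · have ho' : o ∈ xs := by
        rcases List.mem_cons.mp ho with h' | h'
        · exact absurd h'.symm hxo
        · exact h'
      rw [if_neg (by simpa using hxo)]
      have hrec := ih (List.nodup_cons.mp h).2 ho'
      unfold PySem.List.remove? at hrec
      rcases hi : List.idxOf? o xs with _ | k
      · rw [hi] at hrec; simp at hrec
      · rw [hi] at hrec
        simp only [Option.map_some, Option.some.injEq] at hrec
        simp only [Option.map_some, List.eraseIdx_cons_succ, Option.some.injEq]
        rw [hrec, List.filter_cons_of_pos (by simpa using hxo)]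

theorem remove_step_eq_filter (tp : List (List (List Int))) (o : List (List Int))
    (h : tp.Nodup) :
    (if o ∈ tp then (PySem.List.remove? tp o).getD tp else tp)
      = tp.filter (fun x => decide (x ≠ o)) := by
  by_cases ho : o ∈ tp
  · rw [if_pos ho, remove?_nodup_eq tp o h ho]
    rfl
  · rw [if_neg ho]
    symm
    apply List.filter_eq_self.mpr
    intro x hx
    simp only [decide_eq_true_eq]
    exact fun hxo => ho (hxo ▸ hx)

theorem removes_eq_filter (os : List (List (List Int))) (tp : List (List (List Int)))
    (h : tp.Nodup) :
    os.foldl (fun tp o => if o ∈ tp then (PySem.List.remove? tp o).getD tp else tp) tp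
      = tp.filter (fun x => decide (x ∉ os)) := by
  induction os generalizing tp with
  | nil => simp
  | cons o os ih =>
    rw [List.foldl_cons, remove_step_eq_filter tp o h, ih _ (h.filter _), List.filter_filter]
    apply List.filter_congr
    intro x _
    by_cases h1 : x = o <;> by_cases h2 : x ∈ os <;> simp [h1, h2]

theorem tdLoop_eq_scan (R : List (List (List Int))) (seen : PySem.Set (List (List Int)))
    (TD : List (List (List Int)))
    (hnd : R.Nodup)
    (hshape : ∀ t ∈ R, ∃ a b c, t = [a, b, c]) :
    tdLoopA ((R.filter (fun t => !(PySem.Set.contains seen t))).reverse) TD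
      = TD ++ tdScan R seen := by
  induction R generalizing seen TD with
  | nil => simp [tdScan, tdLoopA]
  | cons t rest ih =>
    have hndr : rest.Nodup := (List.nodup_cons.mp hnd).2
    have htr : t ∉ rest := (List.nodup_cons.mp hnd).1
    have hshr : ∀ t' ∈ rest, ∃ a b c, t' = [a, b, c] :=
      fun t' ht' => hshape t' (List.mem_cons_of_mem _ ht')
    by_cases ht : t ∈ seen
    · rw [List.filter_cons_of_neg (by simp [ht])]
      rw [tdScan, if_pos ht]
      exact ih seen TD hndr hshr
    · rw [List.filter_cons_of_pos (by simp [ht]), List.reverse_cons]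
      obtain ⟨a, b, c, habc⟩ := hshape t (List.mem_cons_self ..)
      obtain ⟨l, hl⟩ := S3act_shape a b c
      rw [← habc] at hl
      rw [tdLoopA]
      rw [dif_neg (List.concat_ne_nil _ _)]
      simp only [List.getLast_concat, List.dropLast_concat]
      have hndF : ((rest.filter (fun x => !(PySem.Set.contains seen x))).reverse).Nodup :=
        List.nodup_reverse.mpr (hndr.filter _)
      rw [removes_eq_filter _ _ hndF, List.filter_reverse, List.filter_filter]
      have hfc : rest.filter (fun x =>
            decide (x ∉ (S3act t).drop 1) && !(PySem.Set.contains seen x))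
          = rest.filter (fun x =>
            !(PySem.Set.contains ((S3act t).foldl (fun s o => PySem.Set.add s o) seen) x)) := by
        apply List.filter_congr
        intro x hx
        have hxt : x ≠ t := fun hxt => htr (hxt ▸ hx)
        have hmem : x ∈ (S3act t).foldl (fun s o => PySem.Set.add s o) seen
            ↔ x ∈ seen ∨ x ∈ S3act t := by
          rw [PySem.Set.mem_foldl_add]
          simp
        have horb : x ∈ S3act t ↔ x ∈ (S3act t).drop 1 := by
          rw [hl]
          simp [List.mem_cons, hxt]
        by_cases h1 : x ∈ seen <;> by_cases h2 : x ∈ (S3act t).drop 1 <;>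
          simp [hmem, horb, h1]
      rw [hfc, ih _ (TD ++ [pickRep (S3act t)]) hndr hshr]
      rw [tdScan, if_neg ht]
      simp

theorem tri_ptns_eq (n : Int) : tri_ptns n = tri_ptns_alt n := by
  simp only [tri_ptns, tri_ptns_alt]
  rw [range_odds_reverse]
  have hinv0 : ∀ p ∈ [([] : List Int)], p.Pairwise (fun a b => b < a)
      ∧ ∀ x ∈ p, ∀ k ∈ PySem.List.pyRange (2 * PySem.Int.floordiv (n+1) 2 - 1) 0 (-2), k < x := by
    intro p hp
    rcases List.mem_singleton.mp hp with rfl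
    exact ⟨List.Pairwise.nil, by simp⟩
  obtain ⟨hPP, hndPP⟩ := ppFold_eq n
    (PySem.List.pyRange (2 * PySem.Int.floordiv (n+1) 2 - 1) 0 (-2)) [[]]
    (pairwise_gt_oddRange _) hinv0 (by simp)
  rw [hPP]
  set PP := (PySem.List.pyRange (2 * PySem.Int.floordiv (n+1) 2 - 1) 0 (-2)).foldl
    (fun PP k => PP ++ (PP.filter (fun p => p.sum + k ≤ n)).map (fun p => p ++ [k])) [[]]
    with hPPdef
  rw [tp_eq]
  set TPB := PP.flatMap (fun p1 => PP.flatMap (fun p2 =>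
    ((PP.foldl (fun d p => d.modify p.sum [] (fun l => l ++ [p]))
        PySem.Dict.empty).getD (n - p1.sum - p2.sum) []).map (fun p3 => [p1, p2, p3])))
    with hTPBdef
  have hTPB_nodup : TPB.Nodup := by
    have h1 : TPB = (PP.flatMap (fun p1 => PP.flatMap (fun p2 =>
        PP.map (fun p3 => [p1, p2, p3])))).filter (fun t => (t.map List.sum).sum == n) :=
      (tp_eq n PP).symm
    rw [h1]
    exact List.Nodup.filter _ (tp_nodup PP hndPP)
  have hsh : ∀ t ∈ TPB.reverse, ∃ a b c, t = [a, b, c] := by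
    intro t ht
    rw [List.mem_reverse, hTPBdef] at ht
    obtain ⟨p1, _, ht⟩ := List.mem_flatMap.mp ht
    obtain ⟨p2, _, ht⟩ := List.mem_flatMap.mp ht
    obtain ⟨p3, _, ht⟩ := List.mem_map.mp ht
    exact ⟨p1, p2, p3, ht.symm⟩
  have hfin := tdLoop_eq_scan TPB.reverse PySem.Set.empty []
    (List.nodup_reverse.mpr hTPB_nodup) hsh
  have hflt : (TPB.reverse.filter (fun t => !(PySem.Set.contains PySem.Set.empty t)))
      = TPB.reverse := by
    apply List.filter_eq_self.mpr
    intro x _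
    rfl
  rw [hflt, List.reverse_reverse, List.nil_append] at hfin
  exact hfin

-- ===== VERDICT (by name: the statement is the Claim_ definition above) =====
theorem tri_ptns_spec : Claim_equal_tri_ptns := by
  intro n _
  unfold Spec_tri_ptns
  exact tri_ptns_eq n
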